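-- pv_equiv track=rewrite | github.com/dhruvr10/pr-risk-bot | pr-risk-bot/app/risk.py | _pick_risk_drivers
-- ===== SOURCE A (Python) =====
-- from typing import Any, Dict, List, Optional
--
-- _DRIVER_WEIGHTS: List[tuple[str, int]] = [
--     ("security",    100),
--     ("auth",        100),
--     ("sql",          90),
--     ("migration",    90),
--     ("schema",       90),
--     ("config",       70),
--     ("test",         65),
--     ("large diff",   50),
--     ("big edit",     50),
--     ("many files",   40),
--     ("removed",      25),
-- ]
--
-- def _pick_risk_drivers(signals: List[str], max_items: int = 6) -> List[str]:
--     if not signals: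
--         return []
--
--     def weight(s: str) -> int:
--         low = s.lower()
--         return max((w for kw, w in _DRIVER_WEIGHTS if kw in low), default=0)
--
--     seen: set[str] = set()
--     drivers: List[str] = []
--     for s in sorted(signals, key=weight, reverse=True):
--         if s not in seen:
--             drivers.append(s)
--             seen.add(s)
--         if len(drivers) >= max_items:
--             break
--     return drivers
-- ===== SOURCE B (Python) =====
-- from typing import List
--
-- _DRIVER_WEIGHTS: List[tuple[str, int]] = [
--     ("security",    100),
--     ("auth",        100),
--     ("sql",          90),
--     ("migration",    90),
--     ("schema",       90),
--     ("config",       70),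
--     ("test",         65),
--     ("large diff",   50),
--     ("big edit",     50),
--     ("many files",   40),
--     ("removed",      25),
-- ]
--
-- # the distinct possible weight values, descending
-- _LEVELS = (100, 90, 70, 65, 50, 40, 25, 0)
--
-- def _weight(s: str) -> int:
--     low = s.lower()
--     return max((w for kw, w in _DRIVER_WEIGHTS if kw in low), default=0)
--
-- def _pick_risk_drivers(signals: List[str], max_items: int = 6) -> List[str]:
--     if max_items <= 0:
--         return []
--     ws = [_weight(s) for s in signals]
--     # bucket pass: weights come from the fixed finite set _LEVELS, so one scan
--     # per level yields the stable descending order without sorting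
--     ordered = [s for w in _LEVELS for s, sw in zip(signals, ws) if sw == w]
--     return list(dict.fromkeys(ordered))[:max_items]
-- ===== Notes on version B (the rewrite author's own statement) =====
-- stated objective: alternative
-- what changed: B replaces A's comparison sort by weight with a counting/bucket pass: weights come from a fixed 8-value set, so B memoises each signal's weight once and emits signals level by level in descending weight order (stable by construction), then ordered-dedups and truncates; no sort is performed.
-- intended difference: When max_items <= 0 and signals is nonempty, A still returns a one-element list (it appends the top-weighted signal before checking the bound); B returns the intended empty list, since at most max_items drivers were requested. — e.g. on _pick_risk_drivers(["x"], 0): A returns ["x"], B returns []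
import Mathlib
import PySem

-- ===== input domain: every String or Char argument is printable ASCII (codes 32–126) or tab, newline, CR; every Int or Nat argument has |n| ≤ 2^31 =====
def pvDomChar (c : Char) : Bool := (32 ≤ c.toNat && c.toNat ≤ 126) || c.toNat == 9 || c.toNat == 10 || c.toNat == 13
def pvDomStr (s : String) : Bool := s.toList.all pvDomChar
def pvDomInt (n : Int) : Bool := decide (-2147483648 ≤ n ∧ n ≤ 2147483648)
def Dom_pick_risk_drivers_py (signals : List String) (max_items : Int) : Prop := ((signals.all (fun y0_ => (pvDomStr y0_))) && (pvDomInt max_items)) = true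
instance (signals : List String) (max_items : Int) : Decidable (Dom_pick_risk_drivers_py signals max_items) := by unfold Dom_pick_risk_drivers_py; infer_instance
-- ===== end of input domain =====

-- B replaces A's sort-by-weight with a single bucket pass over the fixed descending weight levels
-- (counting-sort style, no comparison sort); A's accidental one-element result for max_items <= 0
-- is stated as an intended difference D_ (B returns []).


-- ===== PORT A =====
-- _DRIVER_WEIGHTS (shared module constant)
def pvDriverWeights : List (String × Int) :=
  [("security", 100), ("auth", 100), ("sql", 90), ("migration", 90), ("schema", 90),
   ("config", 70), ("test", 65), ("large diff", 50), ("big edit", 50), ("many files", 40),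
   ("removed", 25)]

-- weight(s): identical helper in A (inner def) and in Source B (_weight); ported once.
-- max((w for kw, w in _DRIVER_WEIGHTS if kw in low), default=0)
def pvWeight (s : String) : Int :=
  PySem.List.maxD
    ((pvDriverWeights.filter (fun p => PySem.Str.isIn p.1 (PySem.Str.lower s))).map Prod.snd)
    (fun w => w) 0

-- the for-loop of A: append unseen, break once len(drivers) >= max_items
def pvLoopA (m : Int) : List String → PySem.Set String → List String → List String
  | [], _, drivers => drivers
  | s :: rest, seen, drivers =>
    let p := if seen.contains s then (seen, drivers) else (seen.add s, drivers ++ [s])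
    if m ≤ (p.2.length : Int) then p.2 else pvLoopA m rest p.1 p.2

def pick_risk_drivers_py (signals : List String) (max_items : Int) : List String :=
  if signals = [] then []
  else pvLoopA max_items (PySem.List.sorted signals pvWeight true) PySem.Set.empty []

-- ===== PORT B =====
-- _LEVELS: the distinct possible weights, descending
def pvLevels : List Int := [100, 90, 70, 65, 50, 40, 25, 0]

def pick_risk_drivers_py_alt (signals : List String) (max_items : Int) : List String :=
  if max_items ≤ 0 then []
  else
    let ws := signals.map pvWeight
    let ordered := pvLevels.flatMap
      (fun w => ((signals.zip ws).filter (fun p => p.2 == w)).map Prod.fst)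
    PySem.List.slice (PySem.List.dedup ordered) none (some max_items)

-- ===== PRECONDITION & SPEC =====
-- When max_items ≤ 0 and signals is nonempty, A still returns one driver (it appends the first
-- sorted signal before testing the bound), while B returns the intended empty list.
def D_pick_risk_drivers_py (signals : List String) (max_items : Int) : Prop :=
  signals ≠ [] ∧ max_items ≤ 0
instance (signals : List String) (max_items : Int) : Decidable (D_pick_risk_drivers_py signals max_items) := by unfold D_pick_risk_drivers_py; infer_instance

def Spec_pick_risk_drivers_py (signals : List String) (max_items : Int) (out : List String) : Prop := ¬ D_pick_risk_drivers_py signals max_items → out = pick_risk_drivers_py_alt signals max_items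
instance (signals : List String) (max_items : Int) (out : List String) : Decidable (Spec_pick_risk_drivers_py signals max_items out) := by unfold Spec_pick_risk_drivers_py; infer_instance

def pvDiffWitness_pick_risk_drivers_py : List String × Int := (["x"], 0)
def pvDiffWitnessOut_pick_risk_drivers_py : (List String) × (List String) := (["x"], [])

-- ===== CLAIM (what is proved, stated in full; the proofs are below) =====
def Claim_unchanged_pick_risk_drivers_py : Prop := ∀ (signals : List String) (max_items : Int), Dom_pick_risk_drivers_py signals max_items → Spec_pick_risk_drivers_py signals max_items (pick_risk_drivers_py signals max_items)
def Claim_changed_pick_risk_drivers_py : Prop := Dom_pick_risk_drivers_py (pvDiffWitness_pick_risk_drivers_py.1) (pvDiffWitness_pick_risk_drivers_py.2) ∧ D_pick_risk_drivers_py (pvDiffWitness_pick_risk_drivers_py.1) (pvDiffWitness_pick_risk_drivers_py.2) ∧ pick_risk_drivers_py (pvDiffWitness_pick_risk_drivers_py.1) (pvDiffWitness_pick_risk_drivers_py.2) = pvDiffWitnessOut_pick_risk_drivers_py.1 ∧ pick_risk_drivers_py_alt (pvDiffWitness_pick_risk_drivers_py.1) (pvDiffWitness_pick_risk_drivers_py.2)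 = pvDiffWitnessOut_pick_risk_drivers_py.2 ∧ pvDiffWitnessOut_pick_risk_drivers_py.1 ≠ pvDiffWitnessOut_pick_risk_drivers_py.2
def Claim_exact_pick_risk_drivers_py : Prop := ∀ (signals : List String) (max_items : Int), Dom_pick_risk_drivers_py signals max_items → D_pick_risk_drivers_py signals max_items → pick_risk_drivers_py signals max_items ≠ pick_risk_drivers_py_alt signals max_items

-- ===== LEMMAS AND PROOFS =====

-- every weight value lies in pvLevels
theorem pvWeight_mem_levels (s : String) : pvWeight s ∈ pvLevels := by
  unfold pvWeight
  set xs := (pvDriverWeights.filter (fun p => PySem.Str.isIn p.1 (PySem.Str.lower s))).map Prod.snd with hxs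
  by_cases h : xs = []
  · rw [h]; decide
  · have hm := PySem.List.maxD_mem xs (fun w => w) 0 h
    have hall : ∀ w ∈ xs, w ∈ pvLevels := by
      intro w hw
      rw [hxs] at hw
      simp only [List.mem_map, List.mem_filter] at hw
      obtain ⟨p, ⟨hp, -⟩, rfl⟩ := hw
      simp only [pvDriverWeights, List.mem_cons, List.not_mem_nil, or_false] at hp
      rcases hp with rfl|rfl|rfl|rfl|rfl|rfl|rfl|rfl|rfl|rfl|rfl <;> simp [pvLevels]
    exact hall _ hm

theorem pv_insertBy_of_forall_before {α : Type} (before : α → α → Bool) (x : α) (zs : List α)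
    (h : ∀ y ∈ zs, before x y = true) :
    PySem.List.insertBy before x zs = x :: zs := by
  cases zs with
  | nil => simp [PySem.List.insertBy]
  | cons y ys => simp [PySem.List.insertBy, h y (List.mem_cons_self)]

theorem pv_insertBy_append {α : Type} (before : α → α → Bool) (x : α) (ys zs : List α)
    (h : ∀ y ∈ ys, before x y = false) :
    PySem.List.insertBy before x (ys ++ zs) = ys ++ PySem.List.insertBy before x zs := by
  induction ys with
  | nil => simp
  | cons y ys ih =>
    have hy : before x y = false := h y (List.mem_cons_self)
    simp only [List.cons_append, PySem.List.insertBy, hy, Bool.false_eq_true, if_false]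
    rw [ih (fun z hz => h z (List.mem_cons_of_mem _ hz))]

theorem pv_insertBy_buckets {α : Type} (k : α → Int) (vs : List Int)
    (hvs : vs.Pairwise (· > ·)) (x : α) (hx : k x ∈ vs) (l : List α) :
    PySem.List.insertBy (fun a b => decide (k b < k a)) x
        (vs.flatMap (fun v => l.filter (fun y => k y == v)))
      = vs.flatMap (fun v => (l ++ [x]).filter (fun y => k y == v)) := by
  induction vs with
  | nil => exact absurd hx (List.not_mem_nil)
  | cons v vs' ih =>
    rw [List.pairwise_cons] at hvs
    obtain ⟨hv, hvs'⟩ := hvs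
    have hbucket : ∀ y ∈ l.filter (fun y => k y == v), k y = v := by
      intro y hy
      have := (List.mem_filter.mp hy).2
      exact beq_iff_eq.mp this
    simp only [List.flatMap_cons]
    by_cases hxv : k x = v
    · -- x lands in this bucket, after its existing members, before everything later
      have hskip : ∀ y ∈ l.filter (fun y => k y == v),
          (fun a b => decide (k b < k a)) x y = false := by
        intro y hy; simp [hbucket y hy, hxv]
      rw [pv_insertBy_append _ _ _ _ hskip]
      have hrest : ∀ y ∈ vs'.flatMap (fun v => l.filter (fun z => k z == v)),
          (fun a b => decide (k b < k a)) x y = true := by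
        intro y hy
        obtain ⟨v', hv', hy'⟩ := List.mem_flatMap.mp hy
        have h1 : k y = v' := beq_iff_eq.mp (List.mem_filter.mp hy').2
        have h2 : v > v' := hv v' hv'
        simp [h1, hxv]; omega
      rw [pv_insertBy_of_forall_before _ _ _ hrest]
      have hnot : ∀ v' ∈ vs', (fun v => (l ++ [x]).filter (fun y => k y == v)) v'
          = (fun v => l.filter (fun y => k y == v)) v' := by
        intro v' hv'
        have : v > v' := hv v' hv'
        simp only [List.filter_append, List.filter_cons, List.filter_nil]
        have : (k x == v') = false := by simp; omega
        simp [this]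
      rw [List.flatMap_congr hnot]
      simp [List.filter_append, hxv]
    · -- x belongs to a later bucket: skip this one
      have hx' : k x ∈ vs' := by
        rcases List.mem_cons.mp hx with h | h
        · exact absurd h hxv
        · exact h
      have hskip : ∀ y ∈ l.filter (fun y => k y == v),
          (fun a b => decide (k b < k a)) x y = false := by
        intro y hy
        have h1 : k y = v := hbucket y hy
        have h2 : v > k x := hv _ hx'
        simp [h1]; omega
      rw [pv_insertBy_append _ _ _ _ hskip, ih hvs' hx']
      simp only [List.filter_append, List.filter_cons, List.filter_nil]
      have : (k x == v) = false := by simp [hxv]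
      simp [this]

theorem pv_sorted_rev_eq_buckets {α : Type} (k : α → Int) (vs : List Int)
    (hvs : vs.Pairwise (· > ·)) (l : List α) (hcov : ∀ y ∈ l, k y ∈ vs) :
    PySem.List.sorted l k true = vs.flatMap (fun v => l.filter (fun y => k y == v)) := by
  rw [PySem.List.sorted_rev_eq_foldl_insertBy]
  induction l using List.reverseRecOn with
  | nil => simp
  | append_singleton l x ih =>
    rw [List.foldl_append, List.foldl_cons, List.foldl_nil,
        ih (fun y hy => hcov y (by simp [hy]))]
    exact pv_insertBy_buckets k vs hvs x (hcov x (by simp)) l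

theorem pv_zip_filter (l : List String) (v : Int) :
    ((l.zip (l.map pvWeight)).filter (fun p => p.2 == v)).map Prod.fst
      = l.filter (fun y => pvWeight y == v) := by
  induction l with
  | nil => simp
  | cons a l ih =>
    simp only [List.map_cons, List.zip_cons_cons]
    cases h : pvWeight a == v <;> simp [h, ih]

def pvDD (seen : PySem.Set String) : List String → List String
  | [] => []
  | s :: rest => if seen.contains s then pvDD seen rest else s :: pvDD (seen.add s) rest

theorem pv_foldl_add_eq_dd (l : List String) :
    ∀ acc : PySem.Set String, List.foldl PySem.Set.add acc l = acc ++ pvDD acc l := by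
  induction l with
  | nil => intro acc; simp [pvDD]
  | cons s rest ih =>
    intro acc
    by_cases hc : acc.contains s
    · simp only [List.foldl_cons, PySem.Set.add, hc, if_true, pvDD, ih]
    · simp only [List.foldl_cons, PySem.Set.add, hc, Bool.false_eq_true, if_false, pvDD, ih]
      simp

theorem pv_dedup_eq_dd (l : List String) :
    PySem.List.dedup l = pvDD PySem.Set.empty l := by
  have := pv_foldl_add_eq_dd l PySem.Set.empty
  simpa [PySem.List.dedup, PySem.Set.ofList, PySem.Set.empty] using this

theorem pvLoopA_eq (m : Int) (l : List String) :
    ∀ (seen : PySem.Set String) (drivers : List String), (drivers.length : Int) < m →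
    pvLoopA m l seen drivers = drivers ++ (pvDD seen l).take (m - drivers.length).toNat := by
  induction l with
  | nil => intro seen drivers _; simp [pvLoopA, pvDD]
  | cons s rest ih =>
    intro seen drivers hlt
    by_cases hc : seen.contains s
    · have hnb : ¬ m ≤ (drivers.length : Int) := by omega
      simp only [pvLoopA, hc, if_true, hnb, if_false, pvDD]
      exact ih seen drivers hlt
    · by_cases hm : m ≤ ((drivers ++ [s]).length : Int)
      · have h1 : m = (drivers.length : Int) + 1 := by
          simp only [List.length_append, List.length_cons, List.length_nil] at hm
          push_cast at hm; omega
        have htake : (m - drivers.length).toNat = 1 := by omega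
        simp only [pvLoopA, hc, Bool.false_eq_true, if_false, hm, if_true, pvDD, htake,
          List.take_succ_cons, List.take_zero]
      · simp only [pvLoopA, hc, Bool.false_eq_true, if_false, hm, if_false, pvDD]
        have hlt' : (((drivers ++ [s]).length : Nat) : Int) < m := by
          simp only [List.length_append, List.length_cons, List.length_nil] at hm ⊢
          push_cast at hm ⊢; omega
        rw [ih (seen.add s) (drivers ++ [s]) hlt']
        have h2 : (m - drivers.length).toNat = (m - (drivers ++ [s]).length).toNat + 1 := by
          simp only [List.length_append, List.length_cons, List.length_nil]
          push_cast; omega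
        simp [h2, List.take_succ_cons]

theorem pv_alt_nil (m : Int) : pick_risk_drivers_py_alt [] m = [] := by
  unfold pick_risk_drivers_py_alt
  by_cases hm : m ≤ 0
  · simp [hm]
  · have h0 : (0:Int) ≤ m := by omega
    rw [if_neg hm]
    show PySem.List.slice (PySem.List.dedup (pvLevels.flatMap
        (fun w => ((([] : List String).zip (([] : List String).map pvWeight)).filter
          (fun p => p.2 == w)).map Prod.fst))) none (some m) = []
    rw [PySem.List.slice_to _ h0]
    show List.take m.toNat [] = []
    simp

theorem pick_risk_drivers_py_spec : Claim_unchanged_pick_risk_drivers_py := by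
  intro signals m _
  unfold Spec_pick_risk_drivers_py
  intro hD
  unfold D_pick_risk_drivers_py at hD
  push_neg at hD
  by_cases hs : signals = []
  · subst hs
    simp [pick_risk_drivers_py, pv_alt_nil]
  · have hm : 0 < m := by
      have := hD hs; omega
    have hm' : ¬ m ≤ 0 := by omega
    have hsorted : PySem.List.sorted signals pvWeight true
        = pvLevels.flatMap (fun v => signals.filter (fun y => pvWeight y == v)) :=
      pv_sorted_rev_eq_buckets pvWeight pvLevels (by decide) signals
        (fun y _ => pvWeight_mem_levels y)
    have hordered : pvLevels.flatMap
          (fun w => ((signals.zip (signals.map pvWeight)).filter (fun p => p.2 == w)).map Prod.fst)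
        = pvLevels.flatMap (fun v => signals.filter (fun y => pvWeight y == v)) :=
      List.flatMap_congr (fun v _ => pv_zip_filter signals v)
    unfold pick_risk_drivers_py pick_risk_drivers_py_alt
    rw [if_neg hs, if_neg hm']
    show pvLoopA m (PySem.List.sorted signals pvWeight true) PySem.Set.empty []
      = PySem.List.slice (PySem.List.dedup (pvLevels.flatMap
          (fun w => ((signals.zip (signals.map pvWeight)).filter (fun p => p.2 == w)).map Prod.fst)))
          none (some m)
    rw [hsorted, hordered]
    rw [pvLoopA_eq m _ PySem.Set.empty [] (by simpa using hm)]
    rw [pv_dedup_eq_dd, PySem.List.slice_to _ (le_of_lt hm)]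
    simp

theorem pick_risk_drivers_py_changed : Claim_changed_pick_risk_drivers_py := by
  unfold Claim_changed_pick_risk_drivers_py; decide

theorem pick_risk_drivers_py_tight : Claim_exact_pick_risk_drivers_py := by
  intro signals m _ hD
  obtain ⟨hne, hm⟩ := hD
  have hsne : PySem.List.sorted signals pvWeight true ≠ [] := by
    simpa [PySem.List.sorted_eq_nil_iff] using hne
  obtain ⟨s, t, heq⟩ := List.exists_cons_of_ne_nil hsne
  have hA : pick_risk_drivers_py signals m = [s] := by
    unfold pick_risk_drivers_py
    rw [if_neg hne, heq]
    have hc : (PySem.Set.empty : PySem.Set String).contains s = false := rfl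
    have hb : m ≤ (([] ++ [s] : List String).length : Int) := by simp; omega
    simp only [pvLoopA, hc, Bool.false_eq_true, if_false, hb, if_true]
    simp
  have hB : pick_risk_drivers_py_alt signals m = [] := by
    unfold pick_risk_drivers_py_alt
    rw [if_pos hm]
  rw [hA, hB]
  simp
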